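-- pv_equiv track=rewrite | github.com/edmundo00/tgdj | tangotags.py | capitalize_uppercase_words
-- ===== SOURCE A (Python) =====
-- def capitalize_uppercase_words(text):
--     words = text.split()
--     transformed_words = []
--     for word in words:
--
--         if word == "DE" or word == "De":
--             word = "de"
--         if word == "DEL" or word == "Del":
--             word = "del"
--         if word == "DI" or word == "Di":
--             word = "di"
--         if word.isupper():
--             word = word.capitalize()
--             chars = list(word)
--             for i in range(len(chars) - 1):
--                 # Check if the current character is a quote or hyphen
--                 if chars[i] in ["'", "-"]:
--                     # Capitalize the next character
--                     chars[i + 1] = chars[i + 1].upper()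
--             word = ''.join(chars)
--             transformed_words.append(word)
--         else:
--             transformed_words.append(word)
--
--     return ' '.join(transformed_words)
-- ===== SOURCE B (Python) =====
-- def capitalize_uppercase_words(text):
--     subs = {"DE": "de", "De": "de", "DEL": "del", "Del": "del",
--             "DI": "di", "Di": "di"}
--     out = []
--     for word in text.split():
--         word = subs.get(word, word)
--         if word.isupper():
--             # one pass: uppercase at start and after a quote/hyphen, lowercase elsewhere
--             prev = None
--             buf = []
--             for c in word:
--                 buf.append(c.upper() if (prev is None or prev in "'-") else c.lower())
--                 prev = c
--             word = ''.join(buf)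
--         out.append(word)
--     return ' '.join(out)
-- ===== Notes on version B (the rewrite author's own statement) =====
-- stated objective: simpler
-- what changed: The uppercase branch's capitalize() followed by an index loop that mutates chars[i+1] after each quote/hyphen is replaced by a single left-to-right scan that chooses each character's case from the previous character, and the three substitution ifs become one dict lookup.
import Mathlib
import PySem

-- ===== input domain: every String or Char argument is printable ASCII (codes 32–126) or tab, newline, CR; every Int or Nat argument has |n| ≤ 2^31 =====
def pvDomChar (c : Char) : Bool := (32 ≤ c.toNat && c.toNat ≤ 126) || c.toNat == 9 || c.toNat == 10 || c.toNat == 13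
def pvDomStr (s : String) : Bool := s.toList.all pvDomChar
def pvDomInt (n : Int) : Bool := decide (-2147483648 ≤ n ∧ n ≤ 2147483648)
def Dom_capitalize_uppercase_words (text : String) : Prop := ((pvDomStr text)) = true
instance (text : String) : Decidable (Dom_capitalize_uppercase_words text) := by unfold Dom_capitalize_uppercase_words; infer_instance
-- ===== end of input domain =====

-- B replaces A's capitalize()-then-mutate-by-index pass with a single left-to-right scan
-- that picks each character's case from the previous character (objective: simpler).

-- ===== PORT A =====

-- Python str.isupper(): at least one cased character and no lowercase one; on the ASCII
-- domain the cased characters are exactly the letters, so this is exact there.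
def pvStrIsupper (w : List Char) : Bool :=
  w.any PySem.Chars.isupper && !(w.any PySem.Chars.islower)

-- word.capitalize(): first character titlecased (= uppercased on ASCII, where this is exact),
-- the rest lowercased.
def pvCapitalizeA (w : List Char) : List Char :=
  match w with
  | [] => []
  | c :: rest => PySem.Chars.upperChar c :: PySem.Chars.lower rest

-- one iteration of A's inner loop: if chars[i] in ["'", "-"]: chars[i+1] = chars[i+1].upper()
-- (i and i+1 are always in range here, so getD/set are exact)
def pvFixStep (cs : List Char) (i : Nat) : List Char :=
  if cs.getD i ' ' = '\'' ∨ cs.getD i ' ' = '-' then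
    cs.set (i + 1) (PySem.Chars.upperChar (cs.getD (i + 1) ' '))
  else cs

-- for i in range(len(chars) - 1): …  (mutating chars in place)
def pvFixA (cs : List Char) : List Char :=
  (List.range (cs.length - 1)).foldl pvFixStep cs

-- the per-word body of A's loop: the three substitution ifs, then the isupper branch
def pvWordA (w : String) : String :=
  let w1 := if w = "DE" ∨ w = "De" then "de" else w
  let w2 := if w1 = "DEL" ∨ w1 = "Del" then "del" else w1
  let w3 := if w2 = "DI" ∨ w2 = "Di" then "di" else w2
  if pvStrIsupper w3.toList then String.mk (pvFixA (pvCapitalizeA w3.toList)) else w3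

def capitalize_uppercase_words (text : String) : String :=
  let words := PySem.Str.split₀ text
  let transformed := words.foldl (fun acc w => acc ++ [pvWordA w]) ([] : List String)
  PySem.Str.join " " transformed

-- ===== PORT B =====

-- B's substitution dict
def pvSubsB : PySem.Dict String String :=
  PySem.Dict.mk [("DE", "de"), ("De", "de"), ("DEL", "del"), ("Del", "del"), ("DI", "di"), ("Di", "di")]

-- B's single pass: uppercase at the start and after a quote/hyphen, lowercase elsewhere
def pvScanB (prev : Option Char) (w : List Char) : List Char :=
  match w with
  | [] => []
  | c :: rest =>
    (if prev = none ∨ prev = some '\'' ∨ prev = some '-'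
     then PySem.Chars.upperChar c else PySem.Chars.lowerChar c) :: pvScanB (some c) rest

def pvWordB (w : String) : String :=
  let w' := pvSubsB.getD w w
  if pvStrIsupper w'.toList then String.mk (pvScanB none w'.toList) else w'

def capitalize_uppercase_words_alt (text : String) : String :=
  PySem.Str.join " "
    ((PySem.Str.split₀ text).foldl (fun acc w => acc ++ [pvWordB w]) ([] : List String))

-- ===== PRECONDITION & SPEC =====
def Spec_capitalize_uppercase_words (text : String) (out : String) : Prop := out = capitalize_uppercase_words_alt text
instance (text : String) (out : String) : Decidable (Spec_capitalize_uppercase_words text out) := by unfold Spec_capitalize_uppercase_words; infer_instance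

-- ===== CLAIM (what is proved, stated in full; the proofs are below) =====
def Claim_equal_capitalize_uppercase_words : Prop := ∀ (text : String), Dom_capitalize_uppercase_words text → Spec_capitalize_uppercase_words text (capitalize_uppercase_words text)

-- ===== LEMMAS AND PROOFS =====

theorem pv_toNat_ofNat_small {n : Nat} (h : n < 55296) : (Char.ofNat n).toNat = n := by
  have hv : n.isValidChar := Or.inl h
  simp [Char.ofNat, hv, Char.ofNatAux, Char.toNat]

theorem pv_char_eq_iff (a b : Char) : a = b ↔ a.toNat = b.toNat := by
  constructor
  · intro h; rw [h]
  · intro h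
    have := congrArg Char.ofNat h
    rwa [Char.ofNat_toNat, Char.ofNat_toNat] at this

theorem pv_isupper_iff (c : Char) : PySem.Chars.isupper c = true ↔ (65 ≤ c.toNat ∧ c.toNat ≤ 90) := by
  simp [PySem.Chars.isupper]
  exact Iff.rfl

theorem pv_islower_iff (c : Char) : PySem.Chars.islower c = true ↔ (97 ≤ c.toNat ∧ c.toNat ≤ 122) := by
  simp [PySem.Chars.islower]
  exact Iff.rfl

-- upper ∘ lower = upper on characters
theorem pv_upper_lower (c : Char) :
    PySem.Chars.upperChar (PySem.Chars.lowerChar c) = PySem.Chars.upperChar c := by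
  unfold PySem.Chars.lowerChar
  by_cases h : PySem.Chars.isupper c = true
  · rw [if_pos h]
    rw [pv_isupper_iff] at h
    have ht : (Char.ofNat (c.toNat + 32)).toNat = c.toNat + 32 := pv_toNat_ofNat_small (by omega)
    unfold PySem.Chars.upperChar
    rw [if_pos (by rw [pv_islower_iff, ht]; omega), if_neg (by rw [pv_islower_iff]; omega)]
    rw [ht, pv_char_eq_iff, pv_toNat_ofNat_small (by omega)]
    omega
  · rw [if_neg h]

-- case maps preserve "is a quote or hyphen"
theorem pv_upper_delim (c : Char) :
    (PySem.Chars.upperChar c = '\'' ∨ PySem.Chars.upperChar c = '-') ↔ (c = '\'' ∨ c = '-') := by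
  unfold PySem.Chars.upperChar
  by_cases h : PySem.Chars.islower c = true
  · rw [if_pos h, pv_islower_iff] at *
    have ht : (Char.ofNat (c.toNat - 32)).toNat = c.toNat - 32 := pv_toNat_ofNat_small (by omega)
    simp only [pv_char_eq_iff, ht]
    rw [show '\''.toNat = 39 from rfl, show '-'.toNat = 45 from rfl]
    omega
  · rw [if_neg h]

theorem pv_lower_delim (c : Char) :
    (PySem.Chars.lowerChar c = '\'' ∨ PySem.Chars.lowerChar c = '-') ↔ (c = '\'' ∨ c = '-') := by
  unfold PySem.Chars.lowerChar
  by_cases h : PySem.Chars.isupper c = true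
  · rw [if_pos h, pv_isupper_iff] at *
    have ht : (Char.ofNat (c.toNat + 32)).toNat = c.toNat + 32 := pv_toNat_ofNat_small (by omega)
    simp only [pv_char_eq_iff, ht]
    rw [show '\''.toNat = 39 from rfl, show '-'.toNat = 45 from rfl]
    omega
  · rw [if_neg h]

-- the effect of the first iteration of A's index loop on the tail, as a function
def pvApplyHead (c : Char) (cs : List Char) : List Char :=
  if c = '\'' ∨ c = '-' then
    match cs with
    | [] => []
    | d :: t => PySem.Chars.upperChar d :: t
  else cs

theorem pvApplyHead_length (c : Char) (cs : List Char) : (pvApplyHead c cs).length = cs.length := by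
  unfold pvApplyHead
  split_ifs
  · cases cs <;> simp
  · rfl

theorem pvApplyHead_congr {a b : Char} (h : (a = '\'' ∨ a = '-') ↔ (b = '\'' ∨ b = '-'))
    (cs : List Char) : pvApplyHead a cs = pvApplyHead b cs := by
  unfold pvApplyHead
  by_cases ha : a = '\'' ∨ a = '-'
  · rw [if_pos ha, if_pos (h.mp ha)]
  · rw [if_neg ha, if_neg (fun hb => ha (h.mpr hb))]

theorem pvFixA_nil : pvFixA [] = [] := rfl

theorem pvFixStep_cons (c : Char) (cs : List Char) (i : Nat) :
    pvFixStep (c :: cs) (i + 1) = c :: pvFixStep cs i := by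
  unfold pvFixStep
  simp only [List.getD_cons_succ, List.set_cons_succ]
  split_ifs <;> rfl

theorem pvFold_shift (l : List Nat) (c : Char) (cs : List Char) :
    (l.map (· + 1)).foldl pvFixStep (c :: cs) = c :: l.foldl pvFixStep cs := by
  induction l generalizing cs with
  | nil => rfl
  | cons i t ih => simp only [List.map_cons, List.foldl_cons, pvFixStep_cons, ih]

-- A's index loop, one head step at a time
theorem pvFixA_cons (c : Char) (cs : List Char) :
    pvFixA (c :: cs) = c :: pvFixA (pvApplyHead c cs) := by
  cases cs with
  | nil =>
    have h0 : pvApplyHead c [] = [] := by unfold pvApplyHead; split_ifs <;> rfl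
    rw [h0]; rfl
  | cons d t =>
    unfold pvFixA
    have hlen : (c :: d :: t).length - 1 = t.length + 1 := by simp
    rw [hlen, List.range_succ_eq_map]
    simp only [List.foldl_cons]
    have hstep : pvFixStep (c :: d :: t) 0 = c :: pvApplyHead c (d :: t) := by
      unfold pvFixStep pvApplyHead
      simp only [List.getD_cons_zero, List.getD_cons_succ, List.set_cons_succ, List.set_cons_zero]
      split_ifs <;> rfl
    rw [hstep]
    have hm : (List.range t.length).map Nat.succ = (List.range t.length).map (· + 1) := by simp
    rw [hm, pvFold_shift]
    have hlen2 : (pvApplyHead c (d :: t)).length - 1 = t.length := by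
      rw [pvApplyHead_length]; simp
    rw [hlen2]

-- B's scan with a previous character = A's loop on the lowercased tail
theorem pvScanB_some (w : List Char) (p : Char) :
    pvScanB (some p) w = pvFixA (pvApplyHead p (PySem.Chars.lower w)) := by
  induction w generalizing p with
  | nil =>
    have h0 : pvApplyHead p [] = [] := by unfold pvApplyHead; split_ifs <;> rfl
    show ([] : List Char) = pvFixA (pvApplyHead p (PySem.Chars.lower []))
    rw [show PySem.Chars.lower [] = [] from rfl, h0, pvFixA_nil]
  | cons c rest ih =>
    have hlow : PySem.Chars.lower (c :: rest)
        = PySem.Chars.lowerChar c :: PySem.Chars.lower rest := rfl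
    rw [hlow]
    by_cases hp : p = '\'' ∨ p = '-'
    · have hhead : pvApplyHead p (PySem.Chars.lowerChar c :: PySem.Chars.lower rest)
          = PySem.Chars.upperChar c :: PySem.Chars.lower rest := by
        unfold pvApplyHead
        rw [if_pos hp]
        show PySem.Chars.upperChar (PySem.Chars.lowerChar c) :: PySem.Chars.lower rest = _
        rw [pv_upper_lower]
      rw [hhead, pvFixA_cons, pvApplyHead_congr (pv_upper_delim c), ← ih c]
      show (if (some p = (none : Option Char)) ∨ some p = some '\'' ∨ some p = some '-'
            then PySem.Chars.upperChar c else PySem.Chars.lowerChar c) :: pvScanB (some c) rest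
          = PySem.Chars.upperChar c :: pvScanB (some c) rest
      rw [if_pos (by rcases hp with h | h <;> simp [h])]
    · have hhead : pvApplyHead p (PySem.Chars.lowerChar c :: PySem.Chars.lower rest)
          = PySem.Chars.lowerChar c :: PySem.Chars.lower rest := by
        unfold pvApplyHead
        rw [if_neg hp]
      rw [hhead, pvFixA_cons, pvApplyHead_congr (pv_lower_delim c), ← ih c]
      show (if (some p = (none : Option Char)) ∨ some p = some '\'' ∨ some p = some '-'
            then PySem.Chars.upperChar c else PySem.Chars.lowerChar c) :: pvScanB (some c) rest
          = PySem.Chars.lowerChar c :: pvScanB (some c) rest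
      rw [if_neg (by
        intro hcon
        apply hp
        rcases hcon with h | h | h
        · exact absurd h (by simp)
        · exact Or.inl (Option.some.inj h)
        · exact Or.inr (Option.some.inj h))]

-- B's full scan = A's capitalize + index loop
theorem pvScanB_eq_fixA (w : List Char) :
    pvScanB none w = pvFixA (pvCapitalizeA w) := by
  cases w with
  | nil => rfl
  | cons c rest =>
    have hcap : pvCapitalizeA (c :: rest)
        = PySem.Chars.upperChar c :: PySem.Chars.lower rest := rfl
    rw [hcap, pvFixA_cons, pvApplyHead_congr (pv_upper_delim c), ← pvScanB_some]
    show (if ((none : Option Char) = none) ∨ (none : Option Char) = some '\'' ∨ (none : Option Char) = some '-'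
          then PySem.Chars.upperChar c else PySem.Chars.lowerChar c) :: pvScanB (some c) rest
        = PySem.Chars.upperChar c :: pvScanB (some c) rest
    rw [if_pos (Or.inl rfl)]

-- per word, A's body = B's body
theorem pvWord_eq (w : String) : pvWordA w = pvWordB w := by
  by_cases h1 : w = "DE";  · subst h1; decide
  by_cases h2 : w = "De";  · subst h2; decide
  by_cases h3 : w = "DEL"; · subst h3; decide
  by_cases h4 : w = "Del"; · subst h4; decide
  by_cases h5 : w = "DI";  · subst h5; decide
  by_cases h6 : w = "Di";  · subst h6; decide
  have g1 : ("DE" : String) ≠ w := fun e => h1 e.symm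
  have g2 : ("De" : String) ≠ w := fun e => h2 e.symm
  have g3 : ("DEL" : String) ≠ w := fun e => h3 e.symm
  have g4 : ("Del" : String) ≠ w := fun e => h4 e.symm
  have g5 : ("DI" : String) ≠ w := fun e => h5 e.symm
  have g6 : ("Di" : String) ≠ w := fun e => h6 e.symm
  unfold pvWordA pvWordB
  simp only [h1, h2, h3, h4, h5, h6, or_self, if_false]
  have hd : pvSubsB.getD w w = w := by
    unfold pvSubsB
    rw [PySem.Dict.getD_eq_get?_getD]
    simp [PySem.Dict.get?, g1, g2, g3, g4, g5, g6]
  rw [hd]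
  split_ifs with hu
  · rw [pvScanB_eq_fixA]
  · rfl

theorem pvFold_words (l : List String) (acc : List String) :
    l.foldl (fun a w => a ++ [pvWordA w]) acc = l.foldl (fun a w => a ++ [pvWordB w]) acc := by
  simp only [pvWord_eq]

-- ===== VERDICT (by name: the statement is the Claim_ definition above) =====
theorem capitalize_uppercase_words_spec : Claim_equal_capitalize_uppercase_words := by
  intro text _
  show capitalize_uppercase_words text = capitalize_uppercase_words_alt text
  unfold capitalize_uppercase_words capitalize_uppercase_words_alt
  simp only []
  rw [pvFold_words]
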